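-- pv_equiv track=rewrite | github.com/JooaeSon/Daily_CodingTest | Programmers/Lv.2/[3차] 파일명 정렬.py | slice_three
-- ===== SOURCE A (Python) =====
-- def slice_three(file):
--     HEAD = []
--     NUMBER = []
--     flag = 0
--     # 첫번째 문자부분은 대소문자를 구분하지 않는다.
--     # 숫자 부분의 앞의 0은 무시된다.
--     for i in range(len(file)):
--         if (not file[i].isdigit() and flag != 0) or (file[i].isdigit() and flag == 5):
--             break
--
--         if not file[i].isdigit() and flag == 0:
--             HEAD.append(file[i])
--         elif file[i].isdigit():
--             NUMBER.append(file[i])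
--             flag += 1
--
--     return ''.join(HEAD).lower(), int(''.join(NUMBER))
-- ===== SOURCE B (Python) =====
-- def slice_three(file):
--     i = 0
--     while i < len(file) and not file[i].isdigit():
--         i += 1
--     j = i
--     while j < len(file) and j < i + 5 and file[j].isdigit():
--         j += 1
--     return file[:i].lower(), int(file[i:j])
-- ===== Notes on version B (the rewrite author's own statement) =====
-- stated objective: simpler
-- what changed: A maintains HEAD/NUMBER accumulator lists driven by a flag state machine inside one loop with break; B finds the first-digit index and the end of the (at most 5-digit) run with two index scans and returns lowered/parsed slices, with no flag or accumulators.
-- outside the precondition, e.g. on slice_three(''): A raises ValueError, B raises ValueError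
import Mathlib
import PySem

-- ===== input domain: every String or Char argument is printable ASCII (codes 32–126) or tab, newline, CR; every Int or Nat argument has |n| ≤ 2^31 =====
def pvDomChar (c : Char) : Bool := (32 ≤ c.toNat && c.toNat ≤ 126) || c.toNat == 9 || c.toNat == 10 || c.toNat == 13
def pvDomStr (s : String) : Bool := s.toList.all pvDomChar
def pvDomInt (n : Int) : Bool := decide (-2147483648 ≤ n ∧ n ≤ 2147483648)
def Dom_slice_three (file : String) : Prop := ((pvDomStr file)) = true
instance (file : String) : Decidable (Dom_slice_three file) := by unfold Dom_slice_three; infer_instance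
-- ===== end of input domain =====

-- B replaces A's flag-state accumulator loop by two index scans plus slicing (objective: simpler).

-- ===== PORT A =====
-- the for-loop with break, state (HEAD, NUMBER, flag)
def sliceThreeLoopA : List Char → List Char → List Char → Int → (List Char × List Char)
  | [], h, n, _ => (h, n)
  | c :: cs, h, n, flag =>
    if (!PySem.Chars.isdigit c && !(flag == 0)) || (PySem.Chars.isdigit c && flag == 5) then
      (h, n)
    else if !PySem.Chars.isdigit c && flag == 0 then
      sliceThreeLoopA cs (h ++ [c]) n flag
    else if PySem.Chars.isdigit c then
      sliceThreeLoopA cs h (n ++ [c]) (flag + 1)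
    else
      sliceThreeLoopA cs h n flag

def slice_three (file : String) : String × Int :=
  -- int('') raises ValueError (ofStr? = none); those inputs are excluded by Pre_, .getD 0 is never reached there
  (PySem.Str.lower (String.ofList (sliceThreeLoopA file.toList [] [] 0).1),
   (PySem.Int.ofStr? (String.ofList (sliceThreeLoopA file.toList [] [] 0).2)).getD 0)

-- ===== PORT B =====
-- first while loop: advance i past the non-digit head
def sliceThreeFindB (s : List Char) (i : Nat) : Nat :=
  if h : i < s.length then
    if !PySem.Chars.isdigit s[i] then sliceThreeFindB s (i + 1) else i
  else i
termination_by s.length - i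

-- second while loop: advance j over at most 5 digits
def sliceThreeScanB (s : List Char) (stop : Nat) (j : Nat) : Nat :=
  if h : j < s.length then
    if j < stop && PySem.Chars.isdigit s[j] then sliceThreeScanB s stop (j + 1) else j
  else j
termination_by s.length - j

def slice_three_alt (file : String) : String × Int :=
  (PySem.Str.lower (String.ofList
      (PySem.List.slice file.toList none (some ((sliceThreeFindB file.toList 0 : Nat) : Int)))),
   (PySem.Int.ofStr? (String.ofList
      (PySem.List.slice file.toList
        (some ((sliceThreeFindB file.toList 0 : Nat) : Int))
        (some ((sliceThreeScanB file.toList (sliceThreeFindB file.toList 0 + 5) (sliceThreeFindB file.toList 0) : Nat) : Int))))).getD 0)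

-- ===== PRECONDITION & SPEC =====
-- Pre_ excludes strings with no decimal digit: there A (and B) raise ValueError at int('').
def Pre_slice_three (file : String) : Prop :=
  (file.toList.any (fun c => PySem.Chars.isdigit c)) = true
instance (file : String) : Decidable (Pre_slice_three file) := by unfold Pre_slice_three; infer_instance

def pvWitness_slice_three : String := "img12.png"

def Spec_slice_three (file : String) (out : String × Int) : Prop := out = slice_three_alt file
instance (file : String) (out : String × Int) : Decidable (Spec_slice_three file out) := by unfold Spec_slice_three; infer_instance

-- ===== CLAIM (what is proved, stated in full; the proofs are below) =====
def Claim_equal_slice_three : Prop := ∀ (file : String), Dom_slice_three file → Pre_slice_three file → Spec_slice_three file (slice_three file)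

-- ===== LEMMAS AND PROOFS =====

theorem loopA_phase2 (s : List Char) (h n : List Char) (k : Nat) (hk1 : 1 ≤ k) (hk5 : k ≤ 5) :
    sliceThreeLoopA s h n (k : Int) =
      (h, n ++ (s.takeWhile (fun c => PySem.Chars.isdigit c)).take (5 - k)) := by
  induction s generalizing n k with
  | nil => simp [sliceThreeLoopA]
  | cons c cs ih =>
    by_cases hd : PySem.Chars.isdigit c = true
    · by_cases h5 : k = 5
      · subst h5
        simp [sliceThreeLoopA, hd]
      · have hk0 : ¬ ((k : Int) == 0) = true := by simp; omega
        have hk5' : ¬ ((k : Int) == 5) = true := by simp; omega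
        rw [sliceThreeLoopA, if_neg (by simp [hd, hk5']),
            if_neg (by simp [hd]), if_pos (by simp [hd])]
        have hcast : ((k : Int) + 1) = ((k + 1 : Nat) : Int) := by push_cast; ring
        rw [hcast, ih (n ++ [c]) (k + 1) (by omega) (by omega)]
        have h5k : 5 - k = (5 - (k + 1)) + 1 := by omega
        simp [List.takeWhile_cons, hd, h5k, List.take_succ_cons]
    · rw [sliceThreeLoopA, if_pos (by simp [hd]; omega)]
      simp [List.takeWhile_cons, hd]

theorem loopA_phase1 (s : List Char) (h : List Char) :
    sliceThreeLoopA s h [] 0 =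
      (h ++ s.takeWhile (fun c => !PySem.Chars.isdigit c),
       ((s.dropWhile (fun c => !PySem.Chars.isdigit c)).takeWhile
          (fun c => PySem.Chars.isdigit c)).take 5) := by
  induction s generalizing h with
  | nil => simp [sliceThreeLoopA]
  | cons c cs ih =>
    by_cases hd : PySem.Chars.isdigit c = true
    · rw [sliceThreeLoopA, if_neg (by simp [hd]), if_neg (by simp [hd]), if_pos (by simp [hd])]
      have h1 : ((0 : Int) + 1) = ((1 : Nat) : Int) := by norm_num
      simp only [List.nil_append]
      rw [h1, loopA_phase2 cs h [c] 1 (by omega) (by omega)]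
      simp [List.takeWhile_cons, List.dropWhile_cons, hd, List.take_succ_cons]
    · rw [sliceThreeLoopA, if_neg (by simp [hd]), if_pos (by simp [hd])]
      rw [ih (h ++ [c])]
      simp [List.takeWhile_cons, List.dropWhile_cons, hd]

theorem findB_eq (s : List Char) (i : Nat) :
    sliceThreeFindB s i = i + ((s.drop i).takeWhile (fun c => !PySem.Chars.isdigit c)).length := by
  rw [sliceThreeFindB]
  by_cases h : i < s.length
  · rw [dif_pos h]
    have hdrop : s.drop i = s[i] :: s.drop (i + 1) := List.drop_eq_getElem_cons h
    by_cases hd : PySem.Chars.isdigit s[i] = true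
    · rw [if_neg (by simp [hd])]
      rw [hdrop]
      simp [List.takeWhile_cons, hd]
    · rw [if_pos (by simp [hd]), findB_eq s (i + 1), hdrop]
      simp only [List.takeWhile_cons]
      simp [hd]
      omega
  · rw [dif_neg h]
    simp [List.drop_eq_nil_of_le (by omega : s.length ≤ i)]
termination_by s.length - i

theorem scanB_eq (s : List Char) (stop j : Nat) (hj : j ≤ stop) :
    sliceThreeScanB s stop j =
      j + min (stop - j) ((s.drop j).takeWhile (fun c => PySem.Chars.isdigit c)).length := by
  rw [sliceThreeScanB]
  by_cases h : j < s.length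
  · rw [dif_pos h]
    have hdrop : s.drop j = s[j] :: s.drop (j + 1) := List.drop_eq_getElem_cons h
    by_cases hstop : j < stop
    · by_cases hd : PySem.Chars.isdigit s[j] = true
      · rw [if_pos (by simp [hd]; omega), scanB_eq s stop (j + 1) (by omega), hdrop]
        simp only [List.takeWhile_cons]
        simp [hd]
        omega
      · rw [if_neg (by simp [hd]), hdrop]
        simp [List.takeWhile_cons, hd]
    · have : stop = j := by omega
      subst this
      rw [if_neg (by simp)]
      simp
  · rw [dif_neg h]
    simp [List.drop_eq_nil_of_le (by omega : s.length ≤ j)]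
termination_by s.length - j

-- prefix of a takeWhile: taking k ≤ (takeWhile p s).length elements of s takes them from the prefix
theorem take_takeWhile_eq {α : Type} (p : α → Bool) (s : List α) (k : Nat)
    (hk : k ≤ (s.takeWhile p).length) : s.take k = (s.takeWhile p).take k := by
  obtain ⟨t, ht⟩ := (List.takeWhile_prefix p (l := s))
  calc s.take k = ((s.takeWhile p) ++ t).take k := by rw [ht]
    _ = (s.takeWhile p).take k ++ t.take (k - (s.takeWhile p).length) := List.take_append
    _ = (s.takeWhile p).take k := by simp [(by omega : k - (s.takeWhile p).length = 0)]

theorem drop_length_takeWhile {α : Type} (p : α → Bool) (s : List α) :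
    s.drop (s.takeWhile p).length = s.dropWhile p := by
  induction s with
  | nil => simp
  | cons c cs ih =>
    by_cases hp : p c = true
    · simp [List.takeWhile_cons, List.dropWhile_cons, hp, ih]
    · simp [List.takeWhile_cons, List.dropWhile_cons, hp]

theorem ports_agree (file : String) : slice_three file = slice_three_alt file := by
  unfold slice_three slice_three_alt
  rw [loopA_phase1]
  have hfind : sliceThreeFindB file.toList 0
      = (file.toList.takeWhile (fun c => !PySem.Chars.isdigit c)).length := by
    rw [findB_eq]; simp
  have hscan : sliceThreeScanB file.toList (sliceThreeFindB file.toList 0 + 5) (sliceThreeFindB file.toList 0)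
      = (file.toList.takeWhile (fun c => !PySem.Chars.isdigit c)).length
        + min 5 ((file.toList.dropWhile (fun c => !PySem.Chars.isdigit c)).takeWhile
            (fun c => PySem.Chars.isdigit c)).length := by
    rw [scanB_eq _ _ _ (by omega), hfind, drop_length_takeWhile]
    congr 1
    omega
  rw [hscan, hfind, PySem.List.slice_to_natCast, PySem.List.slice_natCast, drop_length_takeWhile]
  have h1 : file.toList.take (file.toList.takeWhile (fun c => !PySem.Chars.isdigit c)).length
      = file.toList.takeWhile (fun c => !PySem.Chars.isdigit c) := by
    rw [take_takeWhile_eq _ _ _ le_rfl, List.take_length]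
  have h3 : (file.toList.dropWhile (fun c => !PySem.Chars.isdigit c)).take
        (min 5 ((file.toList.dropWhile (fun c => !PySem.Chars.isdigit c)).takeWhile
            (fun c => PySem.Chars.isdigit c)).length)
      = ((file.toList.dropWhile (fun c => !PySem.Chars.isdigit c)).takeWhile
            (fun c => PySem.Chars.isdigit c)).take 5 := by
    rw [take_takeWhile_eq (fun c => PySem.Chars.isdigit c) _ _ (min_le_right _ _)]
    rcases le_total 5 ((file.toList.dropWhile (fun c => !PySem.Chars.isdigit c)).takeWhile
            (fun c => PySem.Chars.isdigit c)).length with h5 | h5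
    · rw [min_eq_left h5]
    · rw [min_eq_right h5, List.take_length, List.take_of_length_le h5]
  have h2 : ((file.toList.takeWhile (fun c => !PySem.Chars.isdigit c)).length
        + min 5 ((file.toList.dropWhile (fun c => !PySem.Chars.isdigit c)).takeWhile
            (fun c => PySem.Chars.isdigit c)).length)
        - (file.toList.takeWhile (fun c => !PySem.Chars.isdigit c)).length
      = min 5 ((file.toList.dropWhile (fun c => !PySem.Chars.isdigit c)).takeWhile
            (fun c => PySem.Chars.isdigit c)).length := by omega
  rw [h2, h1, h3]
  simp

-- ===== VERDICT (by name: the statement is the Claim_ definition above) =====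
theorem slice_three_spec : Claim_equal_slice_three := by
  intro file _ _
  unfold Spec_slice_three
  exact ports_agree file
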